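-- pv_equiv track=rewrite | github.com/zainjhang/incan-DOCS | utils/align_markdown_tables.py | is_delimiter_cell
-- ===== SOURCE A (Python) =====
-- def is_delimiter_cell(cell: str) -> bool:
--     # Accept common delimiter patterns: --- , :--- , ---: , :---:
--     if not cell:
--         return False
--     c = cell.strip()
--     left = c.startswith(":")
--     right = c.endswith(":")
--     core = c[1:-1] if (left and right) else (c[1:] if left else (c[:-1] if right else c))
--     core = core.strip()
--     return len(core) >= 3 and all(ch == "-" for ch in core)
-- ===== SOURCE B (Python) =====
-- def is_delimiter_cell(cell: str) -> bool:
--     # Single-pass state machine over the stripped cell: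
--     # states: 0 start, 1 after leading ':', 2 in dash run, 3 ws after dashes, 4 after trailing ':'
--     state = 0
--     dashes = 0
--     for ch in cell.strip():
--         if state == 0:
--             if ch == ':':
--                 state = 1
--             elif ch == '-':
--                 state = 2
--                 dashes = 1
--             else:
--                 return False
--         elif state == 1:
--             if ch.isspace():
--                 pass
--             elif ch == '-':
--                 state = 2
--                 dashes = 1
--             else:
--                 return False
--         elif state == 2:
--             if ch == '-':
--                 dashes += 1
--             elif ch.isspace():
--                 state = 3
--             elif ch == ':':
--                 state = 4
--             else:
--                 return False
--         elif state == 3: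
--             if ch.isspace():
--                 pass
--             elif ch == ':':
--                 state = 4
--             else:
--                 return False
--         else:  # state 4: nothing may follow the trailing ':'
--             return False
--     return dashes >= 3
-- ===== Notes on version B (the rewrite author's own statement) =====
-- stated objective: alternative
-- what changed: Replaces A's strip/colon-slice/re-strip/all-dashes pipeline with a single left-to-right finite state machine over the stripped string that consumes an optional leading colon, inner whitespace, a dash run (counted) and an optional trailing colon in one pass.
import Mathlib
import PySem

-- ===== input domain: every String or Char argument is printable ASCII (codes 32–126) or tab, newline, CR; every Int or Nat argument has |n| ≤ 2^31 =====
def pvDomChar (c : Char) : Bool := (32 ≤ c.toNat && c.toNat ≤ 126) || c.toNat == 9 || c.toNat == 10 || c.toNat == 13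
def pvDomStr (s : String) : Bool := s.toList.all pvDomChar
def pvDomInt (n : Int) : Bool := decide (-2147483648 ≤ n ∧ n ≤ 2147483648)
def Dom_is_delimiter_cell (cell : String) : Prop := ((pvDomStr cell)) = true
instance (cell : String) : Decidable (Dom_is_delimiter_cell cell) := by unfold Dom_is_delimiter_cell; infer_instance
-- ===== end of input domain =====

-- B replaces A's strip/colon-slice/re-strip/all-dashes pipeline by a one-pass state machine
-- over the stripped string (alternative decomposition, same O(n) cost).

-- ===== PORT A =====
def is_delimiter_cell (cell : String) : Bool :=
  if cell = "" then false
  else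
    let c := PySem.Str.strip cell
    let left := PySem.Str.startswith c ":"
    let right := PySem.Str.endswith c ":"
    let core :=
      if left && right then PySem.Str.slice c (some 1) (some (-1))
      else if left then PySem.Str.slice c (some 1) none
      else if right then PySem.Str.slice c none (some (-1))
      else c
    let core2 := PySem.Str.strip core
    decide (3 ≤ PySem.Str.len core2) && core2.toList.all (fun ch => ch == '-')

-- ===== PORT B =====
-- the for-loop of Source B: `state`/`dashes` are the loop accumulators, early `return False` is `false`,
-- falling off the loop returns `dashes >= 3`
def pvDfa : Nat → Nat → List Char → Bool
  | _, dashes, [] => decide (3 ≤ dashes)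
  | state, dashes, ch :: rest =>
    if state = 0 then
      if ch == ':' then pvDfa 1 dashes rest
      else if ch == '-' then pvDfa 2 1 rest
      else false
    else if state = 1 then
      if PySem.Chars.isspace ch then pvDfa 1 dashes rest
      else if ch == '-' then pvDfa 2 1 rest
      else false
    else if state = 2 then
      if ch == '-' then pvDfa 2 (dashes + 1) rest
      else if PySem.Chars.isspace ch then pvDfa 3 dashes rest
      else if ch == ':' then pvDfa 4 dashes rest
      else false
    else if state = 3 then
      if PySem.Chars.isspace ch then pvDfa 3 dashes rest
      else if ch == ':' then pvDfa 4 dashes rest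
      else false
    else false

def is_delimiter_cell_alt (cell : String) : Bool :=
  pvDfa 0 0 (PySem.Str.strip cell).toList

-- ===== PRECONDITION & SPEC =====
def Spec_is_delimiter_cell (cell : String) (out : Bool) : Prop := out = is_delimiter_cell_alt cell
instance (cell : String) (out : Bool) : Decidable (Spec_is_delimiter_cell cell out) := by unfold Spec_is_delimiter_cell; infer_instance

-- ===== CLAIM (what is proved, stated in full; the proofs are below) =====
def Claim_equal_is_delimiter_cell : Prop := ∀ (cell : String), Dom_is_delimiter_cell cell → Spec_is_delimiter_cell cell (is_delimiter_cell cell)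

-- ===== LEMMAS AND PROOFS =====

def pvWs (c : Char) : Bool := PySem.Chars.isspace c

-- A's `core` (colon removal) on lists
def pvCoreOf (l : List Char) : List Char :=
  if PySem.Chars.startswith l [':'] && PySem.Chars.endswith l [':'] then PySem.List.slice l (some 1) (some (-1))
  else if PySem.Chars.startswith l [':'] then PySem.List.slice l (some 1) none
  else if PySem.Chars.endswith l [':'] then PySem.List.slice l none (some (-1))
  else l

-- A's computation from the stripped string onward, on lists
def pvACore (l : List Char) : Bool :=
  decide (3 ≤ (PySem.Chars.strip (pvCoreOf l)).length) &&
    (PySem.Chars.strip (pvCoreOf l)).all (fun ch => ch == '-')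

-- "remove one trailing ':' if present, strip, demand a run of ≥ 3 dashes"
def pvChkB (u : List Char) : List Char := if u.getLast? = some ':' then u.dropLast else u
def pvChk (u : List Char) : Bool :=
  decide (3 ≤ (PySem.Chars.strip (pvChkB u)).length) &&
    (PySem.Chars.strip (pvChkB u)).all (fun ch => ch == '-')

theorem pvWs_dash : pvWs '-' = false := by decide
theorem pvIsspace_dash : PySem.Chars.isspace '-' = false := by decide

theorem pvTail_getLast (l : List Char) (c : Char) (h : l.tail.getLast? = some c) :
    l.getLast? = some c := by
  cases l with
  | nil => simp at h
  | cons a t =>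
    cases t with
    | nil => simp at h
    | cons b t' => rw [List.getLast?_cons_cons]; simpa using h

theorem pvExists_getLast {l : List Char} (h : l ≠ []) : ∃ y, l.getLast? = some y := by
  cases hgl : l.getLast? with
  | some y => exact ⟨y, rfl⟩
  | none => exact absurd (List.getLast?_eq_none_iff.1 hgl) h

theorem pvHead_dropWhile {p : Char → Bool} {l : List Char} {c : Char}
    (h : (l.dropWhile p).head? = some c) : p c = false := by
  induction l with
  | nil => simp at h
  | cons a t ih =>
    by_cases hp : p a
    · rw [List.dropWhile_cons_of_pos hp] at h; exact ih h
    · rw [List.dropWhile_cons_of_neg hp] at h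
      simp only [List.head?_cons, Option.some.injEq] at h
      subst h
      simpa using hp

theorem pvRstrip_append_cons (xs ys : List Char) (c : Char) (hc : pvWs c = false) :
    PySem.Chars.rstrip (xs ++ c :: ys) = xs ++ c :: PySem.Chars.rstrip ys := by
  unfold PySem.Chars.rstrip
  rw [show (xs ++ c :: ys).reverse = ys.reverse ++ c :: xs.reverse by simp]
  rw [List.dropWhile_append]
  by_cases he : (List.dropWhile PySem.Chars.isspace ys.reverse).isEmpty
  · have hws : (PySem.Chars.isspace c) = false := hc
    rw [if_pos he, List.dropWhile_cons_of_neg (by simp [hws])]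
    have h0 : List.dropWhile PySem.Chars.isspace ys.reverse = [] := by
      simpa [List.isEmpty_iff] using he
    simp [h0]
  · rw [if_neg he]
    simp

theorem pvRstrip_eq_self (l : List Char)
    (h : ∀ x, l.getLast? = some x → pvWs x = false) :
    PySem.Chars.rstrip l = l := by
  rcases List.eq_nil_or_concat l with rfl | ⟨ys, y, rfl⟩
  · rfl
  · have hy : pvWs y = false :=
      h y (by rw [List.concat_eq_append]; exact List.getLast?_concat)
    have h2 := pvRstrip_append_cons ys [] y hy
    rw [List.concat_eq_append]
    simpa using h2

theorem pvRstrip_append_allws (x y : List Char) (hy : ∀ c ∈ y, pvWs c = true) :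
    PySem.Chars.rstrip (x ++ y) = PySem.Chars.rstrip x := by
  unfold PySem.Chars.rstrip
  rw [List.reverse_append, List.dropWhile_append, if_pos]
  simp only [List.isEmpty_iff, List.dropWhile_eq_nil_iff]
  intro c hc
  exact hy c (by simpa using hc)

theorem pvLstrip_append_allws (x y : List Char) (hx : ∀ c ∈ x, pvWs c = true) :
    PySem.Chars.lstrip (x ++ y) = PySem.Chars.lstrip y := by
  unfold PySem.Chars.lstrip
  rw [List.dropWhile_append, if_pos]
  simp only [List.isEmpty_iff, List.dropWhile_eq_nil_iff]
  exact hx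

theorem pvStrip_head (m : List Char) (c : Char)
    (h : (PySem.Chars.strip m).head? = some c) : pvWs c = false := by
  unfold PySem.Chars.strip PySem.Chars.rstrip at h
  have hsuf : (List.dropWhile PySem.Chars.isspace (PySem.Chars.lstrip m).reverse).reverse
      <+: PySem.Chars.lstrip m := by
    have h2 := (List.dropWhile_suffix (l := (PySem.Chars.lstrip m).reverse) PySem.Chars.isspace).reverse
    simpa using h2
  obtain ⟨r, hr⟩ := hsuf
  have hvhead : (PySem.Chars.lstrip m).head? = some c := by
    rw [← hr, List.head?_append, h]; rfl
  exact pvHead_dropWhile (p := PySem.Chars.isspace) (l := m) hvhead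

theorem pvStrip_last (m : List Char) (c : Char)
    (h : (PySem.Chars.strip m).getLast? = some c) : pvWs c = false := by
  unfold PySem.Chars.strip PySem.Chars.rstrip at h
  rw [List.getLast?_reverse] at h
  exact pvHead_dropWhile h

theorem pvStrip_cons_nonws (a : Char) (t : List Char) (ha : pvWs a = false) :
    PySem.Chars.strip (a :: t) = PySem.Chars.rstrip (a :: t) := by
  unfold PySem.Chars.strip PySem.Chars.lstrip
  rw [List.dropWhile_cons_of_neg (by simpa [pvWs] using ha)]

theorem pvDfa4_true_iff (d : Nat) (l : List Char) :
    pvDfa 4 d l = true ↔ l = [] ∧ 3 ≤ d := by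
  cases l <;> simp [pvDfa]

theorem pvDfa3_true_iff (d : Nat) (l : List Char) :
    pvDfa 3 d l = true ↔ (l.dropWhile pvWs = [] ∨ l.dropWhile pvWs = [':']) ∧ 3 ≤ d := by
  induction l with
  | nil => simp [pvDfa]
  | cons a t ih =>
    by_cases hws : PySem.Chars.isspace a
    · rw [show pvDfa 3 d (a :: t) = pvDfa 3 d t by simp [pvDfa, hws]]
      rw [List.dropWhile_cons_of_pos (by simpa [pvWs] using hws)]
      exact ih
    · rw [List.dropWhile_cons_of_neg (by simpa [pvWs] using hws)]
      by_cases ha : a = ':'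
      · subst ha
        rw [show pvDfa 3 d (':' :: t) = pvDfa 4 d t by simp [pvDfa, hws]]
        rw [pvDfa4_true_iff]
        constructor
        · rintro ⟨rfl, h⟩; exact ⟨Or.inr rfl, h⟩
        · rintro ⟨h1 | h2, h⟩
          · simp at h1
          · simp at h2; exact ⟨h2, h⟩
      · rw [show pvDfa 3 d (a :: t) = false by simp [pvDfa, hws, ha]]
        simp [ha]

theorem pvDfa2_true_iff (d : Nat) (l : List Char) :
    pvDfa 2 d l = true ↔
      (((l.dropWhile (fun ch => ch == '-')).dropWhile pvWs = [] ∨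
        (l.dropWhile (fun ch => ch == '-')).dropWhile pvWs = [':']) ∧
      3 ≤ d + (l.takeWhile (fun ch => ch == '-')).length) := by
  induction l generalizing d with
  | nil => simp [pvDfa]
  | cons a t ih =>
    by_cases hd : a = '-'
    · subst hd
      rw [show pvDfa 2 d ('-' :: t) = pvDfa 2 (d + 1) t by simp [pvDfa]]
      rw [List.dropWhile_cons_of_pos (by simp), List.takeWhile_cons_of_pos (by simp)]
      rw [ih (d + 1)]
      constructor
      · rintro ⟨h1, h2⟩; refine ⟨h1, ?_⟩; simp only [List.length_cons]; omega
      · rintro ⟨h1, h2⟩; refine ⟨h1, ?_⟩; simp only [List.length_cons] at h2; omega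
    · have hdb : (a == '-') = false := by simp [hd]
      rw [List.dropWhile_cons_of_neg (by simp [hd]), List.takeWhile_cons_of_neg (by simp [hd])]
      by_cases hws : PySem.Chars.isspace a
      · rw [show pvDfa 2 d (a :: t) = pvDfa 3 d t by simp [pvDfa, hdb, hws]]
        rw [pvDfa3_true_iff]
        rw [List.dropWhile_cons_of_pos (by simpa [pvWs] using hws)]
        simp
      · rw [List.dropWhile_cons_of_neg (by simpa [pvWs] using hws)]
        by_cases ha : a = ':'
        · subst ha
          rw [show pvDfa 2 d (':' :: t) = pvDfa 4 d t by simp [pvDfa, hws]]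
          rw [pvDfa4_true_iff]
          constructor
          · rintro ⟨rfl, h⟩; exact ⟨Or.inr rfl, by simpa using h⟩
          · rintro ⟨h1 | h2, h⟩
            · simp at h1
            · simp at h2; exact ⟨h2, by simpa using h⟩
        · rw [show pvDfa 2 d (a :: t) = false by simp [pvDfa, hdb, hws, ha]]
          simp [ha]

theorem pvDfa1_dropWhile (d : Nat) (u : List Char) :
    pvDfa 1 d u = pvDfa 1 d (u.dropWhile pvWs) := by
  induction u with
  | nil => rfl
  | cons a t ih =>
    by_cases hws : PySem.Chars.isspace a
    · rw [show pvDfa 1 d (a :: t) = pvDfa 1 d t by simp [pvDfa, hws]]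
      rw [List.dropWhile_cons_of_pos (by simpa [pvWs] using hws)]
      exact ih
    · rw [List.dropWhile_cons_of_neg (by simpa [pvWs] using hws)]

theorem pvAll_dash_false {l : List Char} {x : Char} (hx : x ∈ l) (hxd : x ≠ '-') :
    l.all (fun ch => ch == '-') = false := by
  rw [List.all_eq_false]
  exact ⟨x, hx, by simp [hxd]⟩

theorem pvTakeWhile_dash_all (l : List Char) :
    ∀ x ∈ l.takeWhile (fun ch => ch == '-'), x = '-' := by
  intro x hx
  have := List.mem_takeWhile_imp hx
  simpa using this

theorem pvChk_ws_prefix (w u : List Char) (hw : ∀ c ∈ w, pvWs c = true) (hu : u ≠ []) :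
    pvChk (w ++ u) = pvChk u := by
  unfold pvChk pvChkB
  rw [List.getLast?_append_of_ne_nil _ hu]
  by_cases hgl : u.getLast? = some ':'
  · rw [if_pos hgl, if_pos hgl, List.dropLast_append_of_ne_nil hu]
    rw [show PySem.Chars.strip (w ++ u.dropLast) = PySem.Chars.strip u.dropLast from by
      unfold PySem.Chars.strip; rw [pvLstrip_append_allws _ _ hw]]
  · rw [if_neg hgl, if_neg hgl]
    rw [show PySem.Chars.strip (w ++ u) = PySem.Chars.strip u from by
      unfold PySem.Chars.strip; rw [pvLstrip_append_allws _ _ hw]]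

-- the central lemma: from state 1 the machine accepts exactly what pvChk accepts,
-- for inputs that start with a non-whitespace character and have no trailing whitespace
theorem pvKeyCore (c : Char) (r : List Char) (hc : pvWs c = false)
    (hQ : ∀ x, (c :: r).getLast? = some x → pvWs x = false) :
    pvDfa 1 0 (c :: r) = pvChk (c :: r) := by
  by_cases hdash : c = '-'
  · subst hdash
    rw [show pvDfa 1 0 ('-' :: r) = pvDfa 2 1 r by simp [pvDfa, pvIsspace_dash]]
    rw [Bool.eq_iff_iff, pvDfa2_true_iff]
    obtain ⟨ds, hds⟩ : ∃ ds, List.takeWhile (fun ch => ch == '-') r = ds := ⟨_, rfl⟩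
    obtain ⟨r1, hr1⟩ : ∃ r1, List.dropWhile (fun ch => ch == '-') r = r1 := ⟨_, rfl⟩
    rw [hds, hr1]
    have hr : ds ++ r1 = r := by rw [← hds, ← hr1]; exact List.takeWhile_append_dropWhile
    have hds_all : ∀ x ∈ ds, x = '-' := by
      intro x hx; rw [← hds] at hx; exact pvTakeWhile_dash_all r x hx
    cases r1 with
    | nil =>
      have hrall : ∀ x ∈ r, x = '-' := by
        intro x hx; rw [← hr] at hx; simp at hx; exact hds_all x hx
      have hlen : ds.length = r.length := by rw [← hr]; simp
      have hgl : ¬ ('-' :: r).getLast? = some ':' := by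
        intro hcontra
        have hmem := List.mem_of_getLast? hcontra
        rcases List.mem_cons.1 hmem with h | h
        · exact absurd h.symm (by decide)
        · exact absurd (hrall _ h) (by decide)
      unfold pvChk pvChkB
      rw [if_neg hgl]
      rw [pvStrip_cons_nonws _ _ pvWs_dash, pvRstrip_eq_self _ hQ]
      have hall : (('-' :: r).all fun ch => ch == '-') = true := by
        rw [List.all_eq_true]; intro x hx
        rcases List.mem_cons.1 hx with h | h
        · simp [h]
        · simp [hrall x h]
      simp only [hall, Bool.and_true, List.length_cons, decide_eq_true_eq, List.dropWhile_nil]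
      constructor
      · rintro ⟨_, h⟩; omega
      · intro h; exact ⟨by simp, by omega⟩
    | cons c1 r2 =>
      have hc1 : (c1 == '-') = false := by
        refine pvHead_dropWhile (p := fun ch => ch == '-') (l := r) ?_
        rw [hr1]; rfl
      have hc1' : c1 ≠ '-' := by simpa using hc1
      have hlast_eq : ('-' :: r).getLast? = (c1 :: r2).getLast? := by
        rw [show ('-' :: r) = ('-' :: ds) ++ (c1 :: r2) by simp [← hr]]
        exact List.getLast?_append_of_ne_nil _ (by simp)
      have hQr1 : ∀ x, (c1 :: r2).getLast? = some x → pvWs x = false := by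
        intro x hx; exact hQ x (by rw [hlast_eq]; exact hx)
      obtain ⟨ws2, hws2⟩ : ∃ w, List.takeWhile pvWs (c1 :: r2) = w := ⟨_, rfl⟩
      obtain ⟨w1, hw1⟩ : ∃ w, List.dropWhile pvWs (c1 :: r2) = w := ⟨_, rfl⟩
      rw [hw1]
      have hr1dec : ws2 ++ w1 = c1 :: r2 := by
        rw [← hws2, ← hw1]; exact List.takeWhile_append_dropWhile
      have hws2_all : ∀ x ∈ ws2, pvWs x = true := by
        intro x hx; rw [← hws2] at hx; exact List.mem_takeWhile_imp hx
      have hw1ne : w1 ≠ [] := by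
        intro hcontra
        have hallws : ∀ x ∈ (c1 :: r2), pvWs x = true := by
          rw [← List.dropWhile_eq_nil_iff (p := pvWs)]
          rw [hw1]; exact hcontra
        obtain ⟨y, hy⟩ := pvExists_getLast (l := c1 :: r2) (by simp)
        have h1 := hQr1 y hy
        rw [hallws y (List.mem_of_getLast? hy)] at h1
        exact absurd h1 (by simp)
      have hlast_w1 : (c1 :: r2).getLast? = w1.getLast? := by
        rw [← hr1dec]; exact List.getLast?_append_of_ne_nil _ hw1ne
      by_cases hcolon : w1 = [':']
      · have hglc : ('-' :: r).getLast? = some ':' := by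
          rw [hlast_eq, hlast_w1, hcolon]; rfl
        have hshape : ('-' :: r) = (('-' :: ds) ++ ws2) ++ [':'] := by
          rw [show ('-' :: r) = ('-' :: ds) ++ (c1 :: r2) by simp [← hr], ← hr1dec, hcolon]
          simp
        unfold pvChk pvChkB
        rw [if_pos hglc]
        rw [show ('-' :: r).dropLast = ('-' :: ds) ++ ws2 by rw [hshape]; exact List.dropLast_concat]
        rw [show PySem.Chars.strip (('-' :: ds) ++ ws2) = PySem.Chars.rstrip (('-' :: ds) ++ ws2) by
          rw [List.cons_append]; exact pvStrip_cons_nonws _ _ pvWs_dash]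
        rw [pvRstrip_append_allws _ _ hws2_all]
        rw [pvRstrip_eq_self ('-' :: ds) (by
          intro x hx
          have hmem := List.mem_of_getLast? hx
          rcases List.mem_cons.1 hmem with h | h
          · rw [h]; exact pvWs_dash
          · rw [hds_all x h]; exact pvWs_dash)]
        have hall : (('-' :: ds).all fun ch => ch == '-') = true := by
          rw [List.all_eq_true]; intro x hx
          rcases List.mem_cons.1 hx with h | h
          · simp [h]
          · simp [hds_all x h]
        rw [hcolon]
        simp only [hall, Bool.and_true, List.length_cons, decide_eq_true_eq]
        constructor
        · rintro ⟨_, h⟩; omega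
        · intro h; exact ⟨by simp, by omega⟩
      · have hchkfalse : pvChk ('-' :: r) = false := by
          cases hw1' : w1 with
          | nil => exact absurd hw1' hw1ne
          | cons d1 w2 =>
            have hd1ws : pvWs d1 = false := by
              refine pvHead_dropWhile (p := pvWs) (l := c1 :: r2) ?_
              rw [hw1, hw1']; rfl
            unfold pvChk pvChkB
            by_cases hgl : ('-' :: r).getLast? = some ':'
            · have hw2ne : w2 ≠ [] := by
                intro hcontra; subst hcontra
                have h1 : w1.getLast? = some d1 := by rw [hw1']; rfl
                have h2 : some d1 = some ':' := by rw [← h1, ← hlast_w1, ← hlast_eq, hgl]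
                have h3 : d1 = ':' := by simpa using h2
                exact hcolon (by rw [hw1', h3])
              have hshape2 : ('-' :: r) = ('-' :: (ds ++ ws2)) ++ (d1 :: w2) := by
                rw [show ('-' :: r) = ('-' :: ds) ++ (c1 :: r2) by simp [← hr], ← hr1dec, hw1']
                simp
              rw [if_pos hgl]
              rw [show ('-' :: r).dropLast = ('-' :: (ds ++ ws2)) ++ (d1 :: w2.dropLast) by
                rw [hshape2, List.dropLast_append_of_ne_nil (by simp),
                  List.dropLast_cons_of_ne_nil hw2ne]]
              rw [show PySem.Chars.strip (('-' :: (ds ++ ws2)) ++ (d1 :: w2.dropLast))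
                    = PySem.Chars.rstrip (('-' :: (ds ++ ws2)) ++ (d1 :: w2.dropLast)) by
                rw [List.cons_append]; exact pvStrip_cons_nonws _ _ pvWs_dash]
              rw [pvRstrip_append_cons _ _ _ hd1ws]
              cases hws2' : ws2 with
              | nil =>
                have hd1c1 : d1 = c1 := by
                  have h1 : ws2 ++ w1 = c1 :: r2 := hr1dec
                  rw [hws2', hw1'] at h1
                  simp at h1
                  exact h1.1
                rw [pvAll_dash_false (x := d1) (by simp) (by rw [hd1c1]; exact hc1')]
                simp
              | cons e es =>
                have hews : pvWs e = true := hws2_all e (by rw [hws2']; simp)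
                have hene : e ≠ '-' := by
                  intro hcontra; rw [hcontra, pvWs_dash] at hews; simp at hews
                rw [pvAll_dash_false (x := e) (by simp) hene]
                simp
            · rw [if_neg hgl]
              rw [pvStrip_cons_nonws _ _ pvWs_dash, pvRstrip_eq_self _ hQ]
              cases hws2' : ws2 with
              | nil =>
                have hmem : c1 ∈ ('-' :: r) := by
                  rw [show ('-' :: r) = ('-' :: ds) ++ (c1 :: r2) by simp [← hr]]
                  simp
                rw [pvAll_dash_false hmem hc1']
                simp
              | cons e es =>
                have hews : pvWs e = true := hws2_all e (by rw [hws2']; simp)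
                have hene : e ≠ '-' := by
                  intro hcontra; rw [hcontra, pvWs_dash] at hews; simp at hews
                have hmem : e ∈ ('-' :: r) := by
                  rw [show ('-' :: r) = ('-' :: ds) ++ (c1 :: r2) by simp [← hr], ← hr1dec, hws2']
                  simp
                rw [pvAll_dash_false hmem hene]
                simp
        rw [hchkfalse]
        simp only [Bool.false_eq_true, iff_false]
        rintro ⟨h1 | h1, -⟩
        · exact hw1ne h1
        · exact hcolon h1
  · have hcb : (c == '-') = false := by simp [hdash]
    rw [show pvDfa 1 0 (c :: r) = false by
      simp [pvDfa, show PySem.Chars.isspace c = false from hc, hcb]]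
    unfold pvChk pvChkB
    by_cases hgl : (c :: r).getLast? = some ':'
    · rw [if_pos hgl]
      cases r with
      | nil =>
        have hc' : c = ':' := by simpa using hgl
        subst hc'
        decide
      | cons b t =>
        rw [List.dropLast_cons_of_ne_nil (by simp)]
        rw [pvStrip_cons_nonws _ _ hc]
        rw [show PySem.Chars.rstrip (c :: (b :: t).dropLast)
              = c :: PySem.Chars.rstrip ((b :: t).dropLast) by
          have h := pvRstrip_append_cons [] ((b :: t).dropLast) c hc
          simpa using h]
        rw [pvAll_dash_false (x := c) (by simp) hdash]
        simp
    · rw [if_neg hgl]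
      rw [pvStrip_cons_nonws _ _ hc, pvRstrip_eq_self _ hQ]
      rw [pvAll_dash_false (x := c) (by simp) hdash]
      simp

theorem pvKey (u : List Char) (hQ : ∀ c, u.getLast? = some c → pvWs c = false) :
    pvDfa 1 0 u = pvChk u := by
  rw [pvDfa1_dropWhile]
  have hu : u.takeWhile pvWs ++ u.dropWhile pvWs = u := List.takeWhile_append_dropWhile
  cases hv : u.dropWhile pvWs with
  | nil =>
    have hu0 : u = [] := by
      cases hu' : u with
      | nil => rfl
      | cons x xs =>
        exfalso
        have hallws : ∀ c ∈ u, pvWs c = true := List.dropWhile_eq_nil_iff.1 hv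
        obtain ⟨y, hy⟩ := pvExists_getLast (l := u) (by rw [hu']; simp)
        have h1 := hQ y hy
        rw [hallws y (List.mem_of_getLast? hy)] at h1
        exact absurd h1 (by simp)
    subst hu0
    decide
  | cons c r =>
    have hc : pvWs c = false := pvHead_dropWhile (p := pvWs) (l := u) (by rw [hv]; rfl)
    have hlast : u.getLast? = (c :: r).getLast? := by
      conv_lhs => rw [← hu, hv]
      exact List.getLast?_append_of_ne_nil _ (by simp)
    have hQv : ∀ x, (c :: r).getLast? = some x → pvWs x = false := fun x hx =>
      hQ x (by rw [hlast]; exact hx)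
    rw [pvKeyCore c r hc hQv]
    have hws_all : ∀ x ∈ u.takeWhile pvWs, pvWs x = true := fun x hx => List.mem_takeWhile_imp hx
    conv_rhs => rw [← hu, hv]
    exact (pvChk_ws_prefix _ _ hws_all (by simp)).symm

theorem pvStartswith_colon (l : List Char) :
    PySem.Chars.startswith l [':'] = (l.head? == some ':') := by
  cases l with
  | nil => rfl
  | cons a t =>
    show [':'].isPrefixOf (a :: t) = _
    simp [List.isPrefixOf, BEq.comm]

theorem pvEndswith_colon (l : List Char) :
    PySem.Chars.endswith l [':'] = (l.getLast? == some ':') := by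
  have h1 : PySem.Chars.endswith l [':'] = PySem.Chars.startswith l.reverse [':'] := by
    simp [PySem.Chars.endswith, PySem.Chars.startswith, List.isSuffixOf]
  rw [h1, pvStartswith_colon, List.head?_reverse]

theorem pvSlice11 (l : List Char) :
    PySem.List.slice l (some 1) (some (-1)) = l.tail.dropLast := by
  cases l with
  | nil => rfl
  | cons a t =>
    have h0 : PySem.List.slice (a :: t) (some 1) (some (-1)) =
        List.take (PySem.List.clampIdx (a :: t).length (-1) - PySem.List.clampIdx (a :: t).length 1)
          (List.drop (PySem.List.clampIdx (a :: t).length 1) (a :: t)) := rfl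
    have h1 : PySem.List.clampIdx (a :: t).length 1 = 1 := by
      unfold PySem.List.clampIdx
      rw [if_neg (by omega)]
      simp only [Int.toNat_one, List.length_cons]
      omega
    have h2 : PySem.List.clampIdx (a :: t).length (-1) = t.length := by
      unfold PySem.List.clampIdx
      rw [if_pos (by omega), if_neg (by simp only [List.length_cons]; push_cast; omega)]
      simp only [List.length_cons]
      push_cast
      omega
    rw [h0, h1, h2, List.drop_one, List.tail_cons]
    exact (List.dropLast_eq_take).symm

theorem pvLen_decide (s : String) :
    decide (3 ≤ PySem.Str.len s) = decide (3 ≤ s.toList.length) := by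
  rw [PySem.Str.len_eq, decide_eq_decide]
  omega

theorem pvA_toCore (cell : String) :
    is_delimiter_cell cell = pvACore (PySem.Chars.strip cell.toList) := by
  by_cases hcell : cell = ""
  · subst hcell
    decide
  · have hcolon : (":" : String).toList = [':'] := by decide
    unfold pvACore pvCoreOf
    simp only [is_delimiter_cell, if_neg hcell, PySem.Str.startswith_eq, PySem.Str.endswith_eq,
      apply_ite String.toList, PySem.Str.toList_slice, PySem.Str.toList_strip,
      PySem.Chars.slice_eq_listSlice, pvLen_decide, hcolon]

theorem pvACore_eq_chk (l : List Char) :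
    pvACore l = (if l.head? = some ':' then pvChk l.tail else pvChk l) := by
  unfold pvACore pvCoreOf pvChk pvChkB
  rw [pvStartswith_colon, pvEndswith_colon, pvSlice11, PySem.List.slice_from_one,
    PySem.List.slice_to_neg_one]
  cases l with
  | nil => simp
  | cons a t =>
    by_cases ha : a = ':'
    · subst ha
      rw [if_pos (show (':' :: t).head? = some ':' from rfl)]
      cases t with
      | nil => decide
      | cons b t' =>
        simp only [List.head?_cons, beq_self_eq_true, Bool.true_and, List.getLast?_cons_cons,
          List.tail_cons]
        by_cases hgl : (b :: t').getLast? = some ':'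
        · simp [hgl]
        · simp [hgl]
    · have hh : ((a :: t).head? == some ':') = false := by simp [ha]
      rw [if_neg (by simp [ha])]
      simp only [hh, Bool.false_eq_true, if_false]
      by_cases hgl : (a :: t).getLast? = some ':'
      · simp [hgl, ha]
      · simp [hgl, ha]

theorem pvB_start (l : List Char) (hP : ∀ c, l.head? = some c → pvWs c = false) :
    pvDfa 0 0 l = (if l.head? = some ':' then pvDfa 1 0 l.tail else pvDfa 1 0 l) := by
  cases l with
  | nil => simp [pvDfa]
  | cons a t =>
    have hws : PySem.Chars.isspace a = false := hP a rfl
    by_cases ha : a = ':'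
    · subst ha
      rw [if_pos (show (':' :: t).head? = some ':' from rfl)]
      simp [pvDfa]
    · rw [if_neg (by simp [ha])]
      by_cases hd : a = '-'
      · subst hd; simp [pvDfa, hws]
      · simp [pvDfa, hws, ha, hd]

-- ===== VERDICT (by name: the statement is the Claim_ definition above) =====
theorem is_delimiter_cell_spec : Claim_equal_is_delimiter_cell := by
  intro cell _
  unfold Spec_is_delimiter_cell is_delimiter_cell_alt
  rw [pvA_toCore, PySem.Str.toList_strip]
  set l := PySem.Chars.strip cell.toList with hl
  have hP : ∀ c, l.head? = some c → pvWs c = false := fun c h => pvStrip_head _ _ h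
  have hQ : ∀ c, l.getLast? = some c → pvWs c = false := fun c h => pvStrip_last _ _ h
  rw [pvACore_eq_chk, pvB_start l hP]
  by_cases hc : l.head? = some ':'
  · rw [if_pos hc, if_pos hc]
    refine (pvKey _ ?_).symm
    intro c h
    exact hQ c (pvTail_getLast _ _ h)
  · rw [if_neg hc, if_neg hc]
    exact (pvKey _ hQ).symm
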